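-- pv_equiv track=rewrite | github.com/paulLieber98/LinkedIngest | backend/utils/profile_processor.py | _extract_profile_sections
-- ===== SOURCE A (Python) =====
-- from typing import Optional, Dict
--
-- def _extract_profile_sections(text: str) -> Dict[str, str]:
--     """Extract structured information from PDF text"""
--     sections = {
--         "name": "",
--         "headline": "",
--         "about": "",
--         "experience": "",
--         "education": "",
--         "skills": "",
--         "certifications": "",
--         "languages": ""
--     }
--
--     # Split text into lines for processing
--     lines = text.split('\n')
--     current_section = ""
--     section_content = []
--
--     # Common LinkedIn section headers
--     section_markers = {
--         "about": ["about", "summary"],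
--         "experience": ["experience", "work experience", "employment"],
--         "education": ["education", "academic background"],
--         "skills": ["skills", "skills & endorsements", "skills and endorsements"],
--         "certifications": ["licenses & certifications", "certifications"],
--         "languages": ["languages"]
--     }
--
--     # Extract name (usually at the top)
--     for line in lines[:5]:  # Check first 5 lines for name
--         if line.strip() and not any(marker in line.lower() for markers in section_markers.values() for marker in markers):
--             sections["name"] = line.strip()
--             break
--
--     # Process rest of the text
--     for line in lines:
--         line = line.strip()
--         if not line:
--             continue
--
--         # Check if this line is a section header
--         lower_line = line.lower()
--         found_section = False
--         for section, markers in section_markers.items():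
--             if any(marker in lower_line for marker in markers):
--                 # Save previous section content
--                 if current_section and section_content:
--                     sections[current_section] = "\n".join(section_content)
--                 # Start new section
--                 current_section = section
--                 section_content = []
--                 found_section = True
--                 break
--
--         # If not a section header, add to current section
--         if not found_section and current_section:
--             section_content.append(line)
--
--         # Try to extract headline if not found yet
--         if not sections["headline"] and not current_section and line != sections["name"]:
--             sections["headline"] = line
--
--     # Save the last section
--     if current_section and section_content:
--         sections[current_section] = "\n".join(section_content)
--
--     return sections
-- ===== SOURCE B (Python) =====
-- def _extract_profile_sections(text: str) -> dict:
--     """Extract structured information from PDF text (backward grouping pass)."""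
--     section_markers = [
--         ("about", ["about", "summary"]),
--         ("experience", ["experience", "work experience", "employment"]),
--         ("education", ["education", "academic background"]),
--         ("skills", ["skills", "skills & endorsements", "skills and endorsements"]),
--         ("certifications", ["licenses & certifications", "certifications"]),
--         ("languages", ["languages"]),
--     ]
--
--     def header_of(s):
--         low = s.lower()
--         for sec, markers in section_markers:
--             if any(m in low for m in markers):
--                 return sec
--         return None
--
--     lines = text.split('\n')
--
--     # name: first of the first 5 lines that is non-blank and contains no marker
--     name = ""
--     for line in lines[:5]:
--         if line.strip() and header_of(line) is None:
--             name = line.strip()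
--             break
--
--     # one backward pass groups the stripped non-blank lines under their headers
--     content = []
--     groups = []  # collected back-to-front
--     for line in reversed(lines):
--         s = line.strip()
--         if not s:
--             continue
--         sec = header_of(s)
--         if sec is not None:
--             groups.append((sec, content))
--             content = []
--         else:
--             content = [s] + content
--     groups.reverse()
--     prefix = content  # the non-blank lines before the first header
--
--     sections = {
--         "name": name,
--         "headline": "",
--         "about": "",
--         "experience": "",
--         "education": "",
--         "skills": "",
--         "certifications": "",
--         "languages": "",
--     }
--     for s in prefix:
--         if s != name:
--             sections["headline"] = s
--             break
--     for sec, body in groups: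
--         if body:
--             sections[sec] = "\n".join(body)
--     return sections
-- ===== Notes on version B (the rewrite author's own statement) =====
-- stated objective: alternative
-- what changed: A's single forward loop threads mutable state (current_section, section_content, headline test, save-on-boundary, final save) through every line; B instead does one backward grouping pass that builds (prefix-lines, [(section, body)]) as data, extracts the headline from the prefix and assigns each non-empty body afterwards.
import Mathlib
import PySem

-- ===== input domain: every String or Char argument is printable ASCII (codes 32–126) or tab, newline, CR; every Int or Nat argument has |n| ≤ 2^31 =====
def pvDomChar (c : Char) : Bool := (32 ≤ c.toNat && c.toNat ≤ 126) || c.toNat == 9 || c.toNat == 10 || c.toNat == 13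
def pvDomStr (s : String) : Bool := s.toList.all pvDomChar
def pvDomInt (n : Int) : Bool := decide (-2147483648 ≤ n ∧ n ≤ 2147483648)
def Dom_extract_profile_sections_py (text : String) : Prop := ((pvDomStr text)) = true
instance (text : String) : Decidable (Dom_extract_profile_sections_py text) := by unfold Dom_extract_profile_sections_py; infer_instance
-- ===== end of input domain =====

-- B replaces A's stateful forward loop (running section + save-on-boundary + inline headline logic)
-- by one backward grouping pass that builds (prefix, [(section, body)]) and then assigns; objective: alternative decomposition.

-- ===== PORT A =====
-- the section_markers table (same entries, same order as the Python dict; shared by both ports)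
def pvMarkers : List (String × List String) :=
  [("about", ["about", "summary"]),
   ("experience", ["experience", "work experience", "employment"]),
   ("education", ["education", "academic background"]),
   ("skills", ["skills", "skills & endorsements", "skills and endorsements"]),
   ("certifications", ["licenses & certifications", "certifications"]),
   ("languages", ["languages"])]

-- A: 'for line in lines[:5]: if line.strip() and not any(marker in line.lower() ...): name = line.strip(); break'
def pvNameLoopA : List String → Option String
  | [] => none
  | l :: ls =>
    if PySem.Str.strip l ≠ "" ∧
       ¬ (pvMarkers.any (fun p => p.2.any (fun m => PySem.Str.isIn m (PySem.Str.lower l))) = true) then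
      some (PySem.Str.strip l)
    else pvNameLoopA ls

-- A: the inner 'for section, markers in section_markers.items(): if any(marker in lower_line ...): …; break'
def pvFindSection (low : String) : Option String :=
  (pvMarkers.find? (fun p => p.2.any (fun m => PySem.Str.isIn m low))).map Prod.fst

-- A's main loop; state = (sections dict, current_section, section_content); final save appended at [].
def pvLoopA : List String → PySem.Dict String String → String → List String → PySem.Dict String String
  | [], d, cur, cont =>
    if cur ≠ "" ∧ cont ≠ [] then d.insert cur (PySem.Str.join "\n" cont) else d
  | l :: ls, d, cur, cont =>
    let s := PySem.Str.strip l
    if s = "" then pvLoopA ls d cur cont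
    else
      match pvFindSection (PySem.Str.lower s) with
      | some sec =>
        let d1 := if cur ≠ "" ∧ cont ≠ [] then d.insert cur (PySem.Str.join "\n" cont) else d
        -- headline check with current_section = sec (just assigned, so it never fires here)
        let d2 := if d1.getD "headline" "" = "" ∧ sec = "" ∧ s ≠ d1.getD "name" "" then d1.insert "headline" s else d1
        pvLoopA ls d2 sec []
      | none =>
        let cont1 := if cur ≠ "" then cont ++ [s] else cont
        let d1 := if d.getD "headline" "" = "" ∧ cur = "" ∧ s ≠ d.getD "name" "" then d.insert "headline" s else d
        pvLoopA ls d1 cur cont1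

def pvMainA (lines : List String) : PySem.Dict String String :=
  let s0 : PySem.Dict String String := PySem.Dict.ofList
    [("name", ""), ("headline", ""), ("about", ""), ("experience", ""), ("education", ""),
     ("skills", ""), ("certifications", ""), ("languages", "")]
  let s1 := match pvNameLoopA (lines.take 5) with   -- lines[:5] (nonnegative literal bound = take 5, exact)
    | some nm => s0.insert "name" nm
    | none => s0
  pvLoopA lines s1 "" []

def extract_profile_sections_py (text : String) : List (String × String) :=
  -- text.split('\n'): split? is some since the separator is nonempty
  (pvMainA ((PySem.Str.split? text "\n").getD [])).items

-- ===== PORT B =====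
-- Source B's header_of: explicit first-match loop over the marker table
def pvHeaderOfGo (low : String) : List (String × List String) → Option String
  | [] => none
  | (sec, ms) :: rest =>
    if ms.any (fun m => PySem.Str.isIn m low) then some sec else pvHeaderOfGo low rest

def pvHeaderOf (s : String) : Option String := pvHeaderOfGo (PySem.Str.lower s) pvMarkers

-- Source B's name loop over lines[:5]
def pvNameB : List String → String
  | [] => ""
  | l :: ls =>
    if PySem.Str.strip l ≠ "" ∧ pvHeaderOf l = none then PySem.Str.strip l else pvNameB ls

-- one step of Source B's backward pass; state = (content, groups-back-to-front)
def pvBackStep (st : List String × List (String × List String)) (line : String) :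
    List String × List (String × List String) :=
  let s := PySem.Str.strip line
  if s = "" then st
  else
    match pvHeaderOf s with
    | some sec => ([], st.2 ++ [(sec, st.1)])
    | none => (s :: st.1, st.2)

def pvMainB (lines : List String) : PySem.Dict String String :=
  let nm := pvNameB (lines.take 5)
  let st := (lines.reverse).foldl pvBackStep ([], [])   -- 'for line in reversed(lines)'
  let groups := st.2.reverse
  let pre := st.1
  let d0 : PySem.Dict String String := PySem.Dict.ofList
    [("name", nm), ("headline", ""), ("about", ""), ("experience", ""), ("education", ""),
     ("skills", ""), ("certifications", ""), ("languages", "")]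
  let d1 := match pre.find? (fun s => s != nm) with   -- headline: first prefix line ≠ name
    | some s => d0.insert "headline" s
    | none => d0
  groups.foldl (fun d p => if p.2 ≠ [] then d.insert p.1 (PySem.Str.join "\n" p.2) else d) d1

def extract_profile_sections_py_alt (text : String) : List (String × String) :=
  (pvMainB ((PySem.Str.split? text "\n").getD [])).items

-- ===== PRECONDITION & SPEC =====
def Spec_extract_profile_sections_py (text : String) (out : List (String × String)) : Prop := out = extract_profile_sections_py_alt text
instance (text : String) (out : List (String × String)) : Decidable (Spec_extract_profile_sections_py text out) := by unfold Spec_extract_profile_sections_py; infer_instance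

-- ===== CLAIM (what is proved, stated in full; the proofs are below) =====
def Claim_equal_extract_profile_sections_py : Prop := ∀ (text : String), Dom_extract_profile_sections_py text → Spec_extract_profile_sections_py text (extract_profile_sections_py text)

-- ===== LEMMAS AND PROOFS =====

-- spec-side recursive splitter: (prefix content, [(section, body)]) of a line list
def pvG : List String → List String × List (String × List String)
  | [] => ([], [])
  | l :: ls =>
    let r := pvG ls
    let s := PySem.Str.strip l
    if s = "" then r
    else
      match pvHeaderOf s with
      | some sec => ([], (sec, r.1) :: r.2)
      | none => (s :: r.1, r.2)

def pvSave (d : PySem.Dict String String) (cur : String) (c : List String) : PySem.Dict String String :=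
  if c ≠ [] then d.insert cur (PySem.Str.join "\n" c) else d

def pvApply (d : PySem.Dict String String) (gs : List (String × List String)) : PySem.Dict String String :=
  gs.foldl (fun d p => if p.2 ≠ [] then d.insert p.1 (PySem.Str.join "\n" p.2) else d) d

def pvHlStep (d : PySem.Dict String String) (s : String) : PySem.Dict String String :=
  if d.getD "headline" "" = "" ∧ s ≠ d.getD "name" "" then d.insert "headline" s else d

def pvHl (d : PySem.Dict String String) (pre : List String) : PySem.Dict String String :=
  pre.foldl pvHlStep d

theorem pvGo_eq_find (L : List (String × List String)) (low : String) :
    pvHeaderOfGo low L = (L.find? (fun p => p.2.any (fun m => PySem.Str.isIn m low))).map Prod.fst := by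
  induction L with
  | nil => rfl
  | cons p rest ih =>
    obtain ⟨sec, ms⟩ := p
    cases h : ms.any (fun m => PySem.Str.isIn m low) with
    | true =>
      simp only [PySem.Str.isIn_eq] at h
      simp [pvHeaderOfGo, List.find?, h]
    | false =>
      simp only [PySem.Str.isIn_eq] at h
      simp [pvHeaderOfGo, List.find?, h, ih]

theorem pvFindSection_eq (s : String) : pvFindSection (PySem.Str.lower s) = pvHeaderOf s := by
  rw [pvHeaderOf, pvGo_eq_find]; rfl

theorem pvGo_none_iff (L : List (String × List String)) (low : String) :
    pvHeaderOfGo low L = none ↔ L.any (fun p => p.2.any (fun m => PySem.Str.isIn m low)) = false := by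
  induction L with
  | nil => simp [pvHeaderOfGo]
  | cons p rest ih =>
    obtain ⟨sec, ms⟩ := p
    simp only [pvHeaderOfGo, List.any_cons]
    split <;> simp_all

theorem pvHdr_ne (s sec : String) (h : pvHeaderOf s = some sec) : sec ≠ "" := by
  have hm : sec ∈ pvMarkers.map Prod.fst := by
    rw [pvHeaderOf] at h
    generalize hL : pvMarkers = L at h ⊢
    clear hL
    induction L with
    | nil => simp [pvHeaderOfGo] at h
    | cons p rest ih =>
      obtain ⟨s', ms⟩ := p
      simp only [pvHeaderOfGo] at h
      split at h
      · simp_all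
      · simp [ih h]
  intro hemp
  subst hemp
  revert hm
  decide

theorem pvNameB_eq (ls : List String) : pvNameB ls = (pvNameLoopA ls).getD "" := by
  induction ls with
  | nil => rfl
  | cons l ls ih =>
    have hiff : (pvHeaderOf l = none) ↔
        ¬ (pvMarkers.any (fun p => p.2.any (fun m => PySem.Str.isIn m (PySem.Str.lower l))) = true) := by
      rw [pvHeaderOf, pvGo_none_iff]
      simp
    simp only [pvNameB, pvNameLoopA]
    by_cases h1 : PySem.Str.strip l ≠ "" ∧ pvHeaderOf l = none
    · rw [if_pos h1, if_pos ⟨h1.1, hiff.mp h1.2⟩]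
      rfl
    · rw [if_neg h1, if_neg (by rw [hiff] at h1; tauto), ih]

theorem pvBack_eq (lines : List String) :
    (lines.reverse).foldl pvBackStep ([], []) = ((pvG lines).1, (pvG lines).2.reverse) := by
  rw [List.foldl_reverse]
  induction lines with
  | nil => rfl
  | cons l ls ih =>
    rw [List.foldr_cons, ih]
    by_cases hs : PySem.Str.strip l = ""
    · simp [pvBackStep, pvG, hs]
    · cases h : pvHeaderOf (PySem.Str.strip l) <;>
        simp [pvBackStep, pvG, hs, h]

theorem pvG_pre_ne (ls : List String) : ∀ s ∈ (pvG ls).1, s ≠ "" := by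
  induction ls with
  | nil => simp [pvG]
  | cons l ls ih =>
    by_cases hs : PySem.Str.strip l = ""
    · simpa [pvG, hs] using ih
    · cases h : pvHeaderOf (PySem.Str.strip l) with
      | none =>
        intro s hmem
        rcases List.mem_cons.mp (by simpa [pvG, hs, h] using hmem) with h' | h'
        · subst h'; exact hs
        · exact ih s h'
      | some sec => simp [pvG, hs, h]

theorem pvHl_noop (d : PySem.Dict String String) (pre : List String)
    (h : d.getD "headline" "" ≠ "") : pvHl d pre = d := by
  induction pre generalizing d with
  | nil => rfl
  | cons s pre ih =>
    simp only [pvHl, List.foldl_cons]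
    rw [show pvHlStep d s = d by simp [pvHlStep, h]]
    exact ih d h

theorem pvHl_find (pre : List String) (d : PySem.Dict String String) (nm : String)
    (h1 : d.getD "headline" "" = "") (h2 : d.getD "name" "" = nm)
    (h3 : ∀ s ∈ pre, s ≠ "") :
    pvHl d pre = (match pre.find? (fun s => s != nm) with
      | some s => d.insert "headline" s
      | none => d) := by
  induction pre with
  | nil => rfl
  | cons s pre ih =>
    simp only [pvHl, List.foldl_cons, List.find?]
    by_cases hs : s = nm
    · subst hs
      rw [show (s != s) = false by simp]
      rw [show pvHlStep d s = d by simp [pvHlStep, h2]]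
      exact ih (fun t ht => h3 t (List.mem_cons_of_mem _ ht))
    · rw [show (s != nm) = true by simp [hs]]
      rw [show pvHlStep d s = d.insert "headline" s by simp [pvHlStep, h1, h2, hs]]
      have hnz : (d.insert "headline" s).getD "headline" "" ≠ "" := by
        rw [PySem.Dict.getD_insert_self]
        exact h3 s (List.mem_cons_self)
      exact pvHl_noop _ _ hnz

theorem pvM1 (ls : List String) (d : PySem.Dict String String) (cur : String) (cont : List String)
    (hcur : cur ≠ "") :
    pvLoopA ls d cur cont = pvApply (pvSave d cur (cont ++ (pvG ls).1)) (pvG ls).2 := by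
  induction ls generalizing d cur cont with
  | nil =>
    rw [pvLoopA]
    simp [pvG, pvApply, pvSave, hcur]
  | cons l ls ih =>
    by_cases hs : PySem.Str.strip l = ""
    · rw [show pvLoopA (l :: ls) d cur cont = pvLoopA ls d cur cont by
        rw [pvLoopA]; rw [if_pos hs]]
      rw [ih d cur cont hcur]
      simp [pvG, hs]
    · cases h : pvHeaderOf (PySem.Str.strip l) with
      | some sec =>
        have hsec : sec ≠ "" := pvHdr_ne _ _ h
        rw [show pvLoopA (l :: ls) d cur cont = pvLoopA ls (pvSave d cur cont) sec [] by
          rw [pvLoopA]; rw [if_neg hs, pvFindSection_eq, h]; simp [pvSave, hcur, hsec]]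
        rw [ih _ _ _ hsec]
        simp [pvG, hs, h, pvApply, pvSave]
      | none =>
        rw [show pvLoopA (l :: ls) d cur cont = pvLoopA ls d cur (cont ++ [PySem.Str.strip l]) by
          rw [pvLoopA]; rw [if_neg hs, pvFindSection_eq, h]; simp [hcur]]
        rw [ih _ _ _ hcur]
        simp [pvG, hs, h]

theorem pvM2 (ls : List String) (d : PySem.Dict String String) :
    pvLoopA ls d "" [] = pvApply (pvHl d (pvG ls).1) (pvG ls).2 := by
  induction ls generalizing d with
  | nil =>
    rw [pvLoopA]
    simp [pvG, pvApply, pvHl]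
  | cons l ls ih =>
    by_cases hs : PySem.Str.strip l = ""
    · rw [show pvLoopA (l :: ls) d "" [] = pvLoopA ls d "" [] by
        rw [pvLoopA]; rw [if_pos hs]]
      rw [ih d]
      simp [pvG, hs]
    · cases h : pvHeaderOf (PySem.Str.strip l) with
      | some sec =>
        have hsec : sec ≠ "" := pvHdr_ne _ _ h
        rw [show pvLoopA (l :: ls) d "" [] = pvLoopA ls d sec [] by
          rw [pvLoopA]; rw [if_neg hs, pvFindSection_eq, h]; simp [hsec]]
        rw [pvM1 ls d sec [] hsec]
        simp [pvG, hs, h, pvApply, pvSave, pvHl]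
      | none =>
        rw [show pvLoopA (l :: ls) d "" [] = pvLoopA ls (pvHlStep d (PySem.Str.strip l)) "" [] by
          rw [pvLoopA]; rw [if_neg hs, pvFindSection_eq, h]; simp [pvHlStep]]
        rw [ih]
        simp [pvG, hs, h, pvHl]

theorem pvMain_eq (lines : List String) : pvMainA lines = pvMainB lines := by
  have hnm := pvNameB_eq (lines.take 5)
  simp only [pvMainA, pvMainB, pvBack_eq, List.reverse_reverse, hnm]
  rw [pvM2]
  cases hn : pvNameLoopA (lines.take 5) with
  | none =>
    simp only [Option.getD_none]
    rw [pvHl_find (pvG lines).1 _ "" rfl rfl (pvG_pre_ne lines)]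
    rfl
  | some nm =>
    simp only [Option.getD_some]
    rw [pvHl_find (pvG lines).1 _ nm rfl rfl (pvG_pre_ne lines)]
    rfl

-- ===== VERDICT (by name: the statement is the Claim_ definition above) =====
theorem extract_profile_sections_py_spec : Claim_equal_extract_profile_sections_py := by
  intro text _
  unfold Spec_extract_profile_sections_py extract_profile_sections_py extract_profile_sections_py_alt
  rw [pvMain_eq]
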